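-- pv_equiv track=rewrite | github.com/Nixoxo/shared_task_nlp_task | scripts/utils/meaning.py | extract_by_pattern
-- ===== SOURCE A (Python) =====
-- def is_slice_in_list(s, l):
--     len_s = len(s)  # so we don't recompute length of s on every iteration
--     return any(s == l[i:len_s + i] for i in range(len(l) - len_s + 1))
--
-- def is_slice_in_list2(s, l):
--     len_s = len(s)  # so we don't recompute length of s on every iteration
--     for i in range(len(l) - len_s + 1):
--         if s == l[i:len_s + i]:
--             return i
--
-- def extract_by_pattern(patterns, tags, words):
--     extracted_words = []
--     tags_string = " ".join(tags)
--     for pattern in patterns: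
--         pattern_string = " ".join(pattern)
--         if is_slice_in_list(pattern, tags):
--             pattern_start_index = is_slice_in_list2(pattern, tags)
--             if len(pattern) > 1:
--                 # pattern_end_index = tags.index(pattern[-1], pattern_start_index+1)
--                 pattern_end_index = pattern_start_index + len(pattern) - 1
--                 if pattern_end_index - pattern_start_index + 1 == len(pattern):
--                     extracted_part = ""
--                     for i in range(pattern_start_index, pattern_end_index + 1):
--                         extracted_part += words[i] + " "
--                     extracted_words.append(extracted_part[:-1])
--             else:
--                 extracted_words.append(words[pattern_start_index])
--             """
--             if len(pattern) > 1:
--                 pattern_end_index = tags.index(pattern[-1], pattern_start_index+1)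
--                 if pattern_end_index - pattern_start_index +1 != len(pattern):
--                     pattern_end_index = tags.index(pattern[-1], pattern_end_index+1)
--
--                 if pattern_end_index - pattern_start_index + 1 == len(pattern):
--                     extracted_part = ""
--                     for i in range(pattern_start_index, pattern_end_index+1):
--                         extracted_part += words[i] + " "
--
--
--                     extracted_words.append(extracted_part[:-1])
--             else:
--                 extracted_words.append(words[pattern_start_index])
--             """
--     return extracted_words
-- ===== SOURCE B (Python) =====
-- def extract_by_pattern(patterns, tags, words):
--     # Pass 1: ONE sweep over tag start positions (loop nesting inverted vs. a
--     # per-pattern search): for each distinct pattern record in a dict the first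
--     # position where it equals the tag slice starting there.
--     keyed = [(tuple(p), list(p)) for p in patterns]
--     first = {}
--     for start in range(len(tags) + 1):
--         for key, p in keyed:
--             if key not in first and tags[start:start + len(p)] == p:
--                 first[key] = start
--     # Pass 2: emit the extracted phrases in pattern order.
--     out = []
--     for p in patterns:
--         start = first.get(tuple(p))
--         if start is not None:
--             out.append(" ".join(words[start:start + len(p)]) if len(p) > 1 else words[start])
--     return out
-- ===== Notes on version B (the rewrite author's own statement) =====
-- stated objective: alternative
-- what changed: B inverts the loop nesting: instead of A's per-pattern slice searches (an any-scan plus a second index-returning scan), B makes one sweep over tag start positions recording in a dict the first match position of each distinct pattern (so duplicate patterns share the search), then a second pass emits phrases in pattern order via a join over a word slice instead of A's character accumulation and trailing-space strip.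
import Mathlib
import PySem

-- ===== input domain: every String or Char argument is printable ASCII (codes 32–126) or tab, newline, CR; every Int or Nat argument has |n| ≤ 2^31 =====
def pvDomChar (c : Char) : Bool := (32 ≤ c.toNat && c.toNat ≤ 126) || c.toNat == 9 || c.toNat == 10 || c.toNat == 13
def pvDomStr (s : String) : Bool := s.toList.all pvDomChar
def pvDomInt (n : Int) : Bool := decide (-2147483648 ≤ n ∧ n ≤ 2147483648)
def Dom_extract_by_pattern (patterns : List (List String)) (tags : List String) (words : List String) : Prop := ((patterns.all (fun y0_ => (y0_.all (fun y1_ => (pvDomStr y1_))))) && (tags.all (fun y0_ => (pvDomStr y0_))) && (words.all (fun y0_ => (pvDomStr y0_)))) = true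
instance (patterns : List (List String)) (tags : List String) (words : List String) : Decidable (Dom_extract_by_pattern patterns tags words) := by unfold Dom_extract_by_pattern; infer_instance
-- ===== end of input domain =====

-- B inverts the loop nesting: one sweep over tag start positions records in a dict the
-- first match position of each distinct pattern, then a second pass emits the phrases in
-- pattern order with a join over a word slice (objective: alternative, same cost;
-- equivalence of the RETURN value is proved on Pre_, which excludes exactly the inputs
-- where A raises IndexError).

-- ===== PORT A =====
-- is_slice_in_list: any(s == l[i:len_s+i] for i in range(len(l)-len_s+1))
def pvIsSliceInList (s l : List String) : Bool :=
  (PySem.List.pyRange 0 ((l.length : Int) - (s.length : Int) + 1) 1).any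
    (fun i => s == PySem.List.slice l (some i) (some ((s.length : Int) + i)))

-- is_slice_in_list2's for-loop with early return (None when the loop falls through)
def pvIsSliceInList2Loop (s l : List String) : List Int → Option Int
  | [] => none
  | i :: rest =>
      if s == PySem.List.slice l (some i) (some ((s.length : Int) + i)) then some i
      else pvIsSliceInList2Loop s l rest

def pvIsSliceInList2 (s l : List String) : Option Int :=
  pvIsSliceInList2Loop s l (PySem.List.pyRange 0 ((l.length : Int) - (s.length : Int) + 1) 1)

-- extract_by_pattern; tags_string/pattern_string are computed but never used in A, so omitted.
-- words[i] is ported as pyGetD words i "" (Python raises IndexError where pyGet? is none;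
-- those inputs are excluded by Pre_ below).
def extract_by_pattern (patterns : List (List String)) (tags : List String) (words : List String) : List String :=
  patterns.foldl
    (fun extracted_words pattern =>
      if pvIsSliceInList pattern tags then
        match pvIsSliceInList2 pattern tags with
        | none => extracted_words   -- unreachable: the guard guarantees a first index exists
        | some pattern_start_index =>
          if 1 < pattern.length then
            let pattern_end_index := pattern_start_index + (pattern.length : Int) - 1
            if pattern_end_index - pattern_start_index + 1 = (pattern.length : Int) then
              let extracted_part :=
                (PySem.List.pyRange pattern_start_index (pattern_end_index + 1) 1).foldl
                  (fun s i => s ++ PySem.List.pyGetD words i "" ++ " ") ""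
              extracted_words ++ [PySem.Str.slice extracted_part none (some (-1))]
            else extracted_words
          else extracted_words ++ [PySem.List.pyGetD words pattern_start_index ""]
      else extracted_words) []

-- ===== PORT B =====
-- pass 1's body: for key, p in keyed: if key not in first and tags[start:start+len(p)] == p: first[key] = start
def pvSweepStep (keyed : List (List String × List String)) (tags : List String)
    (d : PySem.Dict (List String) Int) (start : Int) : PySem.Dict (List String) Int :=
  keyed.foldl
    (fun d kp =>
      if !(d.contains kp.1) &&
          (PySem.List.slice tags (some start) (some (start + (kp.2.length : Int))) == kp.2) then
        d.insert kp.1 start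
      else d) d

-- keyed = [(tuple(p), list(p)) for p in patterns]: tuple(p) and list(p) are both the
-- list p itself under the type convention (tuple-of-strings and list-of-strings are the
-- same List String value, and Python compares them elementwise), so both pair components are p.
def extract_by_pattern_alt (patterns : List (List String)) (tags : List String) (words : List String) : List String :=
  let keyed := patterns.map (fun p => (p, p))
  let first :=
    (PySem.List.pyRange 0 ((tags.length : Int) + 1) 1).foldl (pvSweepStep keyed tags)
      PySem.Dict.empty
  patterns.foldl
    (fun out p =>
      match first.get? p with
      | none => out
      | some start =>
        if 1 < p.length then
          out ++ [PySem.Str.join " "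
            (PySem.List.slice words (some start) (some (start + (p.length : Int))))]
        else out ++ [PySem.List.pyGetD words start ""]) []

-- ===== PRECONDITION & SPEC =====
-- Pre_ excludes exactly the inputs where A raises IndexError: some pattern occurs in tags
-- with first occurrence index i, but words is too short for indices i..i+max(len,1)-1.
def Pre_extract_by_pattern (patterns : List (List String)) (tags : List String) (words : List String) : Prop :=
  ∀ p ∈ patterns, ∀ i ∈ List.range (tags.length + 1),
    (((tags.drop i).take p.length = p) ∧ ∀ j ∈ List.range i, (tags.drop j).take p.length ≠ p) →
    i + max p.length 1 ≤ words.length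
instance (patterns : List (List String)) (tags : List String) (words : List String) : Decidable (Pre_extract_by_pattern patterns tags words) := by unfold Pre_extract_by_pattern; infer_instance

def pvWitness_extract_by_pattern : List (List String) × List String × List String :=
  ([["N", "V"], ["D"]], ["D", "N", "V"], ["the", "cat", "ran"])

def Spec_extract_by_pattern (patterns : List (List String)) (tags : List String) (words : List String) (out : List String) : Prop := out = extract_by_pattern_alt patterns tags words
instance (patterns : List (List String)) (tags : List String) (words : List String) (out : List String) : Decidable (Spec_extract_by_pattern patterns tags words out) := by unfold Spec_extract_by_pattern; infer_instance

-- ===== CLAIM (what is proved, stated in full; the proofs are below) =====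
def Claim_equal_extract_by_pattern : Prop := ∀ (patterns : List (List String)) (tags : List String) (words : List String), Dom_extract_by_pattern patterns tags words → Pre_extract_by_pattern patterns tags words → Spec_extract_by_pattern patterns tags words (extract_by_pattern patterns tags words)

-- ===== LEMMAS AND PROOFS =====

-- the canonical per-position test both programs make: pattern = tag slice at i
def pvTest (p tags : List String) (i : Nat) : Bool := (tags.drop i).take p.length == p

-- B's slice test at a cast index is pvTest
theorem testB_cast (p tags : List String) (k : Nat) :
    (PySem.List.slice tags (some (k : Int)) (some ((k : Int) + (p.length : Int))) == p) =
      pvTest p tags k := by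
  rw [PySem.List.slice_natCast_add]; rfl

-- A's slice test (operands flipped, bound written len+i) is pvTest too
theorem testA_cast (p tags : List String) (k : Nat) :
    (p == PySem.List.slice tags (some (k : Int)) (some ((p.length : Int) + (k : Int)))) =
      pvTest p tags k := by
  have hb : ((p.length : Int) + (k : Int)) = ((k : Int) + (p.length : Int)) := by ring
  rw [hb, PySem.List.slice_natCast_add]
  unfold pvTest
  rw [Bool.eq_iff_iff, beq_iff_eq, beq_iff_eq]
  exact ⟨fun h => h.symm, fun h => h.symm⟩

-- the Int range A iterates over is a Nat range, cast
theorem range_cast (m n : Nat) :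
    PySem.List.pyRange 0 ((n : Int) - (m : Int) + 1) 1 =
      (List.range (n + 1 - m)).map (Nat.cast : Nat → Int) := by
  rw [PySem.List.pyRange_one]
  have : ((n : Int) - (m : Int) + 1 - 0).toNat = n + 1 - m := by omega
  rw [this]
  apply List.map_congr_left
  intro k _
  omega

theorem range01_cast (n : Nat) :
    PySem.List.pyRange 0 ((n : Int) + 1) 1 =
      (List.range (n + 1)).map (Nat.cast : Nat → Int) := by
  rw [PySem.List.pyRange_one]
  have : ((n : Int) + 1 - 0).toNat = n + 1 := by omega
  rw [this]
  apply List.map_congr_left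
  intro k _
  omega

-- A's second search is the first index of the Nat range passing pvTest
theorem loop_eq_find (s l : List String) :
    ∀ r : List Nat,
      pvIsSliceInList2Loop s l (r.map (Nat.cast : Nat → Int)) =
        (r.find? (pvTest s l)).map (Nat.cast : Nat → Int) := by
  intro r
  induction r with
  | nil => rfl
  | cons a rest ih =>
      rw [List.map_cons]
      simp only [pvIsSliceInList2Loop, List.find?_cons]
      rw [testA_cast]
      cases h : pvTest s l a
      · rw [if_neg (by simp)]; exact ih
      · rw [if_pos rfl]; rfl

-- A's containment guard is exactly "that search succeeds"
theorem any_eq_isSome (s l : List String) (r : List Nat) :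
    (r.map (Nat.cast : Nat → Int)).any
        (fun i => s == PySem.List.slice l (some i) (some ((s.length : Int) + i))) =
      (r.find? (pvTest s l)).isSome := by
  induction r with
  | nil => rfl
  | cons a rest ih =>
      rw [List.map_cons, List.any_cons, List.find?_cons, testA_cast]
      cases h : pvTest s l a
      · rw [Bool.false_or]
        exact ih
      · simp

-- pvTest is false past the last feasible start, so the two ranges search alike
theorem test_false_of_ge (p tags : List String) (i : Nat)
    (h : tags.length + 1 - p.length ≤ i) (hi : i < tags.length + 1) :
    pvTest p tags i = false := by
  unfold pvTest
  rw [beq_eq_false_iff_ne]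
  intro hc
  have hlen : ((tags.drop i).take p.length).length = p.length := by rw [hc]
  rw [List.length_take, List.length_drop] at hlen
  omega

theorem find_range_ext (p tags : List String) :
    (List.range (tags.length + 1)).find? (pvTest p tags) =
      (List.range (tags.length + 1 - p.length)).find? (pvTest p tags) := by
  have hsplit : tags.length + 1 =
      (tags.length + 1 - p.length) + (tags.length + 1 - (tags.length + 1 - p.length)) := by
    omega
  have hnone : ((List.range (tags.length + 1 - (tags.length + 1 - p.length))).map
      (fun x => tags.length + 1 - p.length + x)).find? (pvTest p tags) = none := by
    rw [List.find?_eq_none]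
    intro x hx
    simp only [List.mem_map, List.mem_range] at hx
    obtain ⟨y, hy, rfl⟩ := hx
    rw [test_false_of_ge p tags _ (by omega) (by omega)]
    simp
  conv_lhs => rw [hsplit]
  rw [List.range_add, List.find?_append, hnone, Option.or_none]

-- the inner fold of B's sweep, seen through get?
theorem inner_get (tags : List String) (s : Int) (q : List String) :
    ∀ (ps : List (List String)) (d : PySem.Dict (List String) Int),
      ((ps.foldl
          (fun d p =>
            if !(d.contains p) &&
                (PySem.List.slice tags (some s) (some (s + (p.length : Int))) == p) then
              d.insert p s
            else d) d).get? q) =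
        if q ∈ ps ∧ d.get? q = none ∧
            (PySem.List.slice tags (some s) (some (s + (q.length : Int))) == q) = true then
          some s
        else d.get? q := by
  intro ps
  induction ps with
  | nil => intro d; simp
  | cons p rest ih =>
      intro d
      rw [List.foldl_cons]
      by_cases hg : (!(d.contains p) &&
          (PySem.List.slice tags (some s) (some (s + (p.length : Int))) == p)) = true
      · rw [if_pos hg, ih]
        rw [Bool.and_eq_true] at hg
        have hdnone : d.get? p = none := by
          have hc : d.contains p = false := by simpa using hg.1
          rw [PySem.Dict.contains_eq_isSome_get?] at hc
          cases h : d.get? p with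
          | none => rfl
          | some v => rw [h] at hc; simp at hc
        by_cases hpq : q = p
        · subst hpq
          have hins : (d.insert q s).get? q = some s := PySem.Dict.get?_insert_self d q s
          rw [if_neg (by simp [hins]), hins,
            if_pos ⟨List.mem_cons_self .., hdnone, hg.2⟩]
        · have hne : (d.insert p s).get? q = d.get? q := PySem.Dict.get?_insert_of_ne d s hpq
          rw [hne]
          by_cases h : q ∈ rest ∧ d.get? q = none ∧
              (PySem.List.slice tags (some s) (some (s + (q.length : Int))) == q) = true
          · rw [if_pos h, if_pos ⟨List.mem_cons_of_mem _ h.1, h.2⟩]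
          · rw [if_neg h,
              if_neg (fun hc2 => h ⟨(List.mem_cons.mp hc2.1).resolve_left hpq, hc2.2⟩)]
      · rw [if_neg hg, ih]
        rw [Bool.and_eq_true] at hg
        by_cases hpq : q = p
        · subst hpq
          by_cases hdq : d.get? q = none
          · have hcf : (!(d.contains q)) = true := by
              rw [PySem.Dict.contains_eq_isSome_get?, hdq]; rfl
            have htf : ¬ ((PySem.List.slice tags (some s) (some (s + (q.length : Int))) == q) = true) :=
              fun ht => hg ⟨hcf, ht⟩
            rw [if_neg (fun hc2 => htf hc2.2.2), if_neg (fun hc2 => htf hc2.2.2)]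
          · rw [if_neg (fun hc2 => hdq hc2.2.1), if_neg (fun hc2 => hdq hc2.2.1)]
        · by_cases h : q ∈ rest ∧ d.get? q = none ∧
              (PySem.List.slice tags (some s) (some (s + (q.length : Int))) == q) = true
          · rw [if_pos h, if_pos ⟨List.mem_cons_of_mem _ h.1, h.2⟩]
          · rw [if_neg h,
              if_neg (fun hc2 => h ⟨(List.mem_cons.mp hc2.1).resolve_left hpq, hc2.2⟩)]

theorem outer_get (patterns : List (List String)) (tags : List String) (q : List String)
    (hq : q ∈ patterns) :
    ∀ (r : List Nat) (d : PySem.Dict (List String) Int),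
      ((r.map (Nat.cast : Nat → Int)).foldl
          (pvSweepStep (patterns.map (fun p => (p, p))) tags) d).get? q =
        ((d.get? q).orElse (fun _ =>
          (r.find? (pvTest q tags)).map (Nat.cast : Nat → Int))) := by
  intro r
  induction r with
  | nil => intro d; cases hd : d.get? q <;> simp [hd, Option.orElse]
  | cons i rest ih =>
      intro d
      rw [List.map_cons, List.foldl_cons, ih]
      have hstep := inner_get tags (i : Int) q patterns d
      rw [testB_cast] at hstep
      have hfold : (pvSweepStep (patterns.map (fun p => (p, p))) tags d (i : Int)) =
          (patterns.foldl
            (fun d p =>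
              if !(d.contains p) &&
                  (PySem.List.slice tags (some (i : Int))
                    (some ((i : Int) + (p.length : Int))) == p) then
                d.insert p (i : Int)
              else d) d) := by
        unfold pvSweepStep
        rw [List.foldl_map]
      cases hd : d.get? q with
      | some v =>
          rw [hd] at hstep
          simp only [Option.some_ne_none, false_and, and_false, if_false] at hstep
          rw [hfold, hstep]
          simp [Option.orElse]
      | none =>
          rw [hd] at hstep
          cases ht : pvTest q tags i with
          | true =>
              rw [if_pos ⟨hq, rfl, ht⟩] at hstep
              rw [hfold, hstep]
              simp [Option.orElse, ht]
          | false =>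
              rw [if_neg (by simp [ht])] at hstep
              rw [hfold, hstep]
              simp [Option.orElse, ht]

-- what a successful find? on a strictly increasing list returns: the first passing index
theorem find_some_spec (f : Nat → Bool) (k : Nat) :
    ∀ r : List Nat, r.Pairwise (· < ·) →
      r.find? f = some k →
      k ∈ r ∧ f k = true ∧ ∀ j ∈ r, j < k → f j = false := by
  intro r
  induction r with
  | nil => intro _ h; exact absurd h (by simp)
  | cons a rest ih =>
      intro hpw hfind
      rw [List.pairwise_cons] at hpw
      rw [List.find?_cons] at hfind
      cases ha : f a with
      | true =>
          rw [ha] at hfind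
          obtain rfl : a = k := by simpa using hfind
          refine ⟨List.mem_cons_self .., ha, ?_⟩
          intro j hj hlt
          rcases List.mem_cons.mp hj with h | h
          · omega
          · exact absurd (hpw.1 j h) (by omega)
      | false =>
          rw [ha] at hfind
          replace hfind : List.find? f rest = some k := hfind
          obtain ⟨hmem, hfk, hfirst⟩ := ih hpw.2 hfind
          refine ⟨List.mem_cons_of_mem _ hmem, hfk, ?_⟩
          intro j hj hlt
          rcases List.mem_cons.mp hj with h | h
          · subst h; exact ha
          · exact hfirst j h hlt

-- A's character-accumulating word loop, read on toList
theorem fold_words (words : List String) :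
    ∀ (m k : Nat) (acc : String), k + m ≤ words.length →
      ((PySem.List.pyRange (k : Int) ((k : Int) + (m : Int)) 1).foldl
          (fun s i => s ++ PySem.List.pyGetD words i "" ++ " ") acc).toList =
        acc.toList ++ ((words.drop k).take m).flatMap (fun w => w.toList ++ [' ']) := by
  intro m
  induction m with
  | zero =>
      intro k acc _
      rw [PySem.List.pyRange_one_eq_nil (by simp)]
      simp
  | succ n ih =>
      intro k acc hle
      rw [PySem.List.pyRange_one_cons (by omega),
        show ((k : Int) + 1) = (((k + 1 : Nat)) : Int) by push_cast; ring]
      have hb : (k : Int) + ((n + 1 : Nat) : Int) = ((k + 1 : Nat) : Int) + (n : Int) := by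
        push_cast; ring
      rw [hb]
      simp only [List.foldl_cons]
      rw [ih (k + 1) _ (by omega)]
      have hk : k < words.length := by omega
      rw [List.drop_eq_getElem_cons hk, List.take_succ_cons]
      rw [PySem.List.pyGetD_natCast, List.getD_eq_getElem _ _ hk]
      simp [String.toList_append]

-- strip-the-last-space equals a " ".join
theorem dropLast_flatMap_join :
    ∀ ws : List (List Char), ws ≠ [] →
      (ws.flatMap (fun w => w ++ [' '])).dropLast = [' '].intercalate ws := by
  intro ws
  induction ws with
  | nil => intro h; exact absurd rfl h
  | cons w rest ih =>
      intro _
      cases rest with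
      | nil => simp [List.intercalate]
      | cons v vs =>
          have hne : ((v :: vs).flatMap (fun w => w ++ [' '])) ≠ [] := by
            simp [List.flatMap_cons]
          rw [List.flatMap_cons, List.dropLast_append_of_ne_nil hne, ih (by simp)]
          simp [List.intercalate, List.intersperse]

-- the extracted phrase: A's accumulate-and-strip equals B's join over the word slice
theorem extract_eq (words : List String) (k m : Nat) (hm : 1 ≤ m)
    (hw : k + m ≤ words.length) :
    PySem.Str.slice
        ((PySem.List.pyRange (k : Int) ((k : Int) + (m : Int)) 1).foldl
          (fun s i => s ++ PySem.List.pyGetD words i "" ++ " ") "") none (some (-1)) =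
      PySem.Str.join " " (PySem.List.slice words (some (k : Int)) (some ((k : Int) + (m : Int)))) := by
  apply String.toList_inj.mp
  rw [PySem.Str.slice_to_neg_one, fold_words words m k "" hw]
  rw [PySem.Str.toList_join, PySem.List.slice_natCast_add]
  have hws : ((words.drop k).take m) ≠ [] := by
    have : ((words.drop k).take m).length = m := by
      simp [List.length_take, List.length_drop]; omega
    intro h; rw [h] at this; simp at this; omega
  have hmap : ((words.drop k).take m).flatMap (fun w => w.toList ++ [' ']) =
      (((words.drop k).take m).map String.toList).flatMap (fun w => w ++ [' ']) := by
    rw [List.flatMap_map]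
  rw [show ("" : String).toList = [] by rfl, List.nil_append, hmap,
    dropLast_flatMap_join _ (by simpa using hws)]
  have hsep : (" " : String).toList = [' '] := by rfl
  simp [PySem.Chars.join, hsep]

-- ===== VERDICT (by name: the statement is the Claim_ definition above) =====
theorem extract_by_pattern_spec : Claim_equal_extract_by_pattern := by
  intro patterns tags words _ hpre
  unfold Spec_extract_by_pattern extract_by_pattern extract_by_pattern_alt
  rw [range01_cast]
  apply PySem.List.foldl_congr_mem
  intro acc p hp
  have hpre_p := hpre p hp
  set F := (List.range (tags.length + 1 - p.length)).find? (pvTest p tags) with hF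
  have hget : ((((List.range (tags.length + 1)).map (Nat.cast : Nat → Int)).foldl
      (pvSweepStep (patterns.map (fun p => (p, p))) tags) PySem.Dict.empty).get? p) =
      F.map (Nat.cast : Nat → Int) := by
    rw [outer_get patterns tags p hp, PySem.Dict.get?_empty, find_range_ext]
    rfl
  have hguard : pvIsSliceInList p tags = F.isSome := by
    unfold pvIsSliceInList
    rw [range_cast p.length tags.length, any_eq_isSome]
  have hloop : pvIsSliceInList2 p tags = F.map (Nat.cast : Nat → Int) := by
    unfold pvIsSliceInList2
    rw [range_cast p.length tags.length, loop_eq_find]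
  cases hfind : F with
  | none =>
      rw [hguard, hfind, hget, hfind]
      simp
  | some k =>
      obtain ⟨hkmem, hmatch, hfirst⟩ :=
        find_some_spec (pvTest p tags) k _ List.pairwise_lt_range (hF ▸ hfind)
      have hkn : k < tags.length + 1 - p.length := List.mem_range.mp hkmem
      have htake : (tags.drop k).take p.length = p := by
        have := hmatch; unfold pvTest at this; exact beq_iff_eq.mp this
      have hwlen : k + max p.length 1 ≤ words.length := by
        apply hpre_p k (List.mem_range.mpr (by omega))
        refine ⟨htake, ?_⟩
        intro j hj
        have hj' : j < k := List.mem_range.mp hj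
        have := hfirst j (List.mem_range.mpr (by omega)) hj'
        intro hc
        unfold pvTest at this
        rw [hc] at this
        simp at this
      rw [hguard, hfind, hloop, hfind, hget, hfind]
      simp only [Option.isSome_some, if_true, Option.map_some]
      by_cases hlen : 1 < p.length
      · rw [if_pos hlen, if_pos hlen]
        have hcond : (k : Int) + (p.length : Int) - 1 - (k : Int) + 1 = (p.length : Int) := by ring
        rw [if_pos hcond]
        have hb : (k : Int) + (p.length : Int) - 1 + 1 = (k : Int) + (p.length : Int) := by ring
        rw [hb, extract_eq words k p.length (by omega) (by omega)]
      · rw [if_neg hlen, if_neg hlen]
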